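-- pv_equiv track=rewrite | github.com/Sassa-nf/pi | longest_dup/e.py | doh2
-- ===== SOURCE A (Python) =====
-- def doh2(xs):
--    begin, end = 0, len(xs)
--    while begin + 1 < end:
--       i = (begin + end) // 2
--       s = sum([begin < x <= i for x in xs])
--       if s > i - begin:
--          end = i
--       else:
--          begin = i
--    return end
-- ===== SOURCE B (Python) =====
-- def doh2(xs):
--     n = len(xs)
--     # prefix counts: pre[k] = number of x in xs with x <= k, for 0 <= k <= n
--     freq = [0] * (n + 1)
--     base = 0
--     for x in xs:
--         if x <= 0:
--             base += 1
--         elif x <= n: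
--             freq[x] += 1
--     pre = [0] * (n + 1)
--     run = base
--     for k in range(n + 1):
--         run += freq[k]
--         pre[k] = run
--     begin, end = 0, n
--     while begin + 1 < end:
--         i = (begin + end) // 2
--         if pre[i] - pre[begin] > i - begin:
--             end = i
--         else:
--             begin = i
--     return end
-- ===== Notes on version B (the rewrite author's own statement) =====
-- stated objective: faster
-- what changed: B precomputes a prefix-sum table of value counts (count of elements <= k for k = 0..n) in one O(n) pass, so each binary-search step reads the count in O(1) instead of rescanning the whole list.
import Mathlib
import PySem

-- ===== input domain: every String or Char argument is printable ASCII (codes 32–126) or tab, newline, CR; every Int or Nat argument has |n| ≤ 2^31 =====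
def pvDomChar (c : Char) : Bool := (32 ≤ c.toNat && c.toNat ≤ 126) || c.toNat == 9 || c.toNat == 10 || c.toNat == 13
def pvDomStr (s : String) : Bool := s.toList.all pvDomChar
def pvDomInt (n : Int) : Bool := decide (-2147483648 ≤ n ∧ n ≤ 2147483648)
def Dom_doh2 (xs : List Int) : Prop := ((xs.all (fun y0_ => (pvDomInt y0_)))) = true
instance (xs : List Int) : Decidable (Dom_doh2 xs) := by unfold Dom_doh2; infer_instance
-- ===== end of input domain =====

-- B replaces A's per-step O(n) list scan by a prefix-sum table of value counts built once, making each binary-search step O(1); same return value.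


-- midpoint of Python's '(begin + end) // 2' is strictly between the bounds
theorem doh2_mid_bounds {b e : Int} (h : b + 1 < e) :
    b < PySem.Int.floordiv (b + e) 2 ∧ PySem.Int.floordiv (b + e) 2 < e := by
  rw [PySem.Int.floordiv_eq_ediv_of_pos (by norm_num)]
  omega

-- ===== PORT A =====
-- the while-loop of A: s recounts 'begin < x <= i' over the whole list each step
def doh2Loop (xs : List Int) (b e : Int) : Int :=
  if h : b + 1 < e then
    let i := PySem.Int.floordiv (b + e) 2
    let s : Int := (xs.map (fun x => if b < x ∧ x ≤ i then (1 : Int) else 0)).sum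
    if s > i - b then doh2Loop xs b i else doh2Loop xs i e
  else e
termination_by (e - b).toNat
decreasing_by
  · have := doh2_mid_bounds h; omega
  · have := doh2_mid_bounds h; omega

def doh2 (xs : List Int) : Int := doh2Loop xs 0 xs.length

-- ===== PORT B =====
-- body of B's first loop: tally x<=0 into base, 1<=x<=n into freq[x]
def doh2AltStep (n : Int) (st : List Int × Int) (x : Int) : List Int × Int :=
  if x ≤ 0 then (st.1, st.2 + 1)
  else if x ≤ n then (PySem.List.pySetD st.1 x (PySem.List.pyGetD st.1 x 0 + 1), st.2)
  else st

-- body of B's second loop: running prefix sum written into pre[k]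
def doh2PreStep (freq : List Int) (st : List Int × Int) (k : Int) : List Int × Int :=
  let run := st.2 + PySem.List.pyGetD freq k 0
  (PySem.List.pySetD st.1 k run, run)

-- the while-loop of B: count of 'begin < x <= i' read off the table in O(1)
def doh2AltLoop (pre : List Int) (b e : Int) : Int :=
  if h : b + 1 < e then
    let i := PySem.Int.floordiv (b + e) 2
    if PySem.List.pyGetD pre i 0 - PySem.List.pyGetD pre b 0 > i - b then
      doh2AltLoop pre b i
    else
      doh2AltLoop pre i e
  else e
termination_by (e - b).toNat
decreasing_by
  · have := doh2_mid_bounds h; omega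
  · have := doh2_mid_bounds h; omega

def doh2_alt (xs : List Int) : Int :=
  let n : Int := xs.length
  let fb := xs.foldl (doh2AltStep n) (List.replicate (n.toNat + 1) 0, 0)
  let pr := (PySem.List.pyRange 0 (n + 1) 1).foldl (doh2PreStep fb.1)
      (List.replicate (n.toNat + 1) 0, fb.2)
  doh2AltLoop pr.1 0 n

-- ===== PRECONDITION & SPEC =====
def Spec_doh2 (xs : List Int) (out : Int) : Prop := out = doh2_alt xs
instance (xs : List Int) (out : Int) : Decidable (Spec_doh2 xs out) := by unfold Spec_doh2; infer_instance

-- ===== CLAIM (what is proved, stated in full; the proofs are below) =====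
def Claim_equal_doh2 : Prop := ∀ (xs : List Int), Dom_doh2 xs → Spec_doh2 xs (doh2 xs)

-- ===== LEMMAS AND PROOFS =====

-- number of elements ≤ k, as an Int
def cntLE (xs : List Int) (k : Int) : Int := (xs.countP (fun x => x ≤ k) : Int)

theorem getD_setD (xs : List Int) (i j : Int) (v d : Int)
    (h0 : 0 ≤ i) (h1 : i < xs.length) (h2 : 0 ≤ j) :
    PySem.List.pyGetD (PySem.List.pySetD xs i v) j d =
      if j = i then v else PySem.List.pyGetD xs j d := by
  have hi : i = (i.toNat : Int) := by omega
  have hj : j = (j.toNat : Int) := by omega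
  rw [hi, hj, PySem.List.pyGetD_pySetD_natCast xs i.toNat j.toNat v d (by omega)]
  by_cases h : j.toNat = i.toNat
  · rw [if_pos h, if_pos (by exact_mod_cast h)]
  · rw [if_neg h, if_neg (by intro hc; exact h (by exact_mod_cast hc))]

theorem getD_replicate (m : Nat) (j : Int) (hj : 0 ≤ j) :
    PySem.List.pyGetD (List.replicate m (0 : Int)) j 0 = 0 := by
  have hj' : j = (j.toNat : Int) := by omega
  rw [hj', PySem.List.pyGetD_natCast]
  simp only [List.getD, List.getElem?_replicate]
  split_ifs <;> rfl

theorem sum_band (xs : List Int) (b i : Int) (hbi : b ≤ i) :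
    (xs.map (fun x => if b < x ∧ x ≤ i then (1 : Int) else 0)).sum
      = cntLE xs i - cntLE xs b := by
  induction xs with
  | nil => simp [cntLE]
  | cons x xs ih =>
    simp only [List.map_cons, List.sum_cons, cntLE, List.countP_cons] at *
    by_cases h1 : b < x ∧ x ≤ i
    · simp [h1, h1.1, h1.2, show ¬ (x ≤ b) by omega]
      push_cast; omega
    · have hx : ¬ (b < x) ∨ ¬ (x ≤ i) := by tauto
      rcases hx with hx | hx
      · simp [h1, show x ≤ b by omega, show x ≤ i by omega]
        push_cast; omega
      · simp [h1, hx, show ¬ (x ≤ b) by omega]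
        push_cast; omega

-- invariant of B's first loop
theorem freq_inv (n : Int) (hn : 0 ≤ n) :
    ∀ (xs : List Int) (f : List Int) (base : Int), f.length = n.toNat + 1 →
      (xs.foldl (doh2AltStep n) (f, base)).1.length = n.toNat + 1
      ∧ (xs.foldl (doh2AltStep n) (f, base)).2
          = base + (xs.countP (fun x => x ≤ 0) : Int)
      ∧ PySem.List.pyGetD (xs.foldl (doh2AltStep n) (f, base)).1 0 0
          = PySem.List.pyGetD f 0 0
      ∧ ∀ v : Int, 1 ≤ v → v ≤ n →
          PySem.List.pyGetD (xs.foldl (doh2AltStep n) (f, base)).1 v 0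
            = PySem.List.pyGetD f v 0 + (xs.countP (fun x => x = v) : Int) := by
  intro xs
  induction xs with
  | nil => intro f base hf; simp [hf]
  | cons x xs ih =>
    intro f base hf
    simp only [List.foldl_cons]
    by_cases h1 : x ≤ 0
    · have step : doh2AltStep n (f, base) x = (f, base + 1) := by
        simp [doh2AltStep, h1]
      rw [step]
      obtain ⟨l1, l2, l3, l4⟩ := ih f (base + 1) hf
      refine ⟨l1, ?_, l3, ?_⟩
      · rw [l2]; simp [List.countP_cons, h1]; push_cast; omega
      · intro v hv1 hv2
        rw [l4 v hv1 hv2]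
        simp [List.countP_cons, show ¬ (x = v) by omega]
    · by_cases h2 : x ≤ n
      · have step : doh2AltStep n (f, base) x
            = (PySem.List.pySetD f x (PySem.List.pyGetD f x 0 + 1), base) := by
          simp [doh2AltStep, h1, h2]
        rw [step]
        have hflen : (PySem.List.pySetD f x (PySem.List.pyGetD f x 0 + 1)).length
            = n.toNat + 1 := by rw [PySem.List.length_pySetD, hf]
        obtain ⟨l1, l2, l3, l4⟩ := ih _ base hflen
        have hxlen : x < (f.length : Int) := by rw [hf]; omega
        refine ⟨l1, ?_, ?_, ?_⟩
        · rw [l2]; simp [List.countP_cons, h1]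
        · rw [l3, getD_setD f x 0 _ 0 (by omega) hxlen (le_refl 0)]
          simp [show ¬ ((0:Int) = x) by omega]
        · intro v hv1 hv2
          rw [l4 v hv1 hv2, getD_setD f x v _ 0 (by omega) hxlen (by omega)]
          by_cases hvx : v = x
          · simp [hvx, List.countP_cons]; push_cast; omega
          · simp [hvx, List.countP_cons, show ¬ (x = v) by omega]
      · have step : doh2AltStep n (f, base) x = (f, base) := by
          simp [doh2AltStep, h1, h2]
        rw [step]
        obtain ⟨l1, l2, l3, l4⟩ := ih f base hf
        refine ⟨l1, ?_, l3, ?_⟩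
        · rw [l2]; simp [List.countP_cons, h1]
        · intro v hv1 hv2
          rw [l4 v hv1 hv2]
          simp [List.countP_cons, show ¬ (x = v) by omega]

-- partial sums of the freq table
def freqSum (freq : List Int) (m : Nat) : Int :=
  ((List.range m).map (fun k => PySem.List.pyGetD freq (k : Int) 0)).sum

-- invariant of B's second loop (range 0..m-1 processed)
theorem pre_inv (freq : List Int) (L : Nat) :
    ∀ (m : Nat) (p : List Int) (run : Int), p.length = L → m ≤ L →
      ((PySem.List.pyRange 0 (m : Int) 1).foldl (doh2PreStep freq) (p, run)).1.length = L
      ∧ ((PySem.List.pyRange 0 (m : Int) 1).foldl (doh2PreStep freq) (p, run)).2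
          = run + freqSum freq m
      ∧ ∀ j : Int, 0 ≤ j → j < (m : Int) →
          PySem.List.pyGetD ((PySem.List.pyRange 0 (m : Int) 1).foldl (doh2PreStep freq) (p, run)).1 j 0
            = run + freqSum freq (j.toNat + 1) := by
  intro m
  induction m with
  | zero =>
    intro p run hp hm
    simp [PySem.List.pyRange_one_eq_nil, freqSum]
    exact ⟨hp, by intro j h1 h2; omega⟩
  | succ m ih =>
    intro p run hp hm
    have hsplit : PySem.List.pyRange 0 ((m : Int) + 1) 1
        = PySem.List.pyRange 0 (m : Int) 1 ++ [(m : Int)] := by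
      exact PySem.List.pyRange_one_succ_right (by omega)
    rw [show ((m + 1 : Nat) : Int) = (m : Int) + 1 by push_cast; ring, hsplit,
        List.foldl_append]
    obtain ⟨l1, l2, l3⟩ := ih p run hp (by omega)
    set res := (PySem.List.pyRange 0 (m : Int) 1).foldl (doh2PreStep freq) (p, run) with hres
    simp only [List.foldl_cons, List.foldl_nil]
    have hstep : doh2PreStep freq res (m : Int)
        = (PySem.List.pySetD res.1 (m : Int) (res.2 + PySem.List.pyGetD freq (m : Int) 0),
           res.2 + PySem.List.pyGetD freq (m : Int) 0) := rfl
    rw [hstep]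
    have hmL : (m : Int) < (res.1.length : Int) := by rw [l1]; push_cast; omega
    have hsum : run + freqSum freq m + PySem.List.pyGetD freq (m : Int) 0
        = run + freqSum freq (m + 1) := by
      simp [freqSum, List.range_succ]
      ring
    refine ⟨by rw [PySem.List.length_pySetD]; exact l1, by rw [l2]; exact hsum, ?_⟩
    intro j hj1 hj2
    rw [getD_setD res.1 (m : Int) j _ 0 (by omega) hmL hj1]
    by_cases hjm : j = (m : Int)
    · rw [if_pos hjm, hjm, l2, Int.toNat_natCast]
      exact hsum
    · rw [if_neg hjm, l3 j hj1 (by omega)]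

theorem cntLE_succ (xs : List Int) (j : Int) :
    cntLE xs (j + 1) = cntLE xs j + (xs.countP (fun x => x = j + 1) : Int) := by
  induction xs with
  | nil => simp [cntLE]
  | cons x xs ih =>
    simp only [cntLE, List.countP_cons] at *
    by_cases h1 : x ≤ j + 1 <;> by_cases h2 : x ≤ j <;> by_cases h3 : x = j + 1 <;>
      first
        | (simp [h1, h2, h3]; push_cast at *; omega)
        | omega

-- the pre table of B holds cntLE at every index 0..n
theorem pre_is_cntLE (xs : List Int) :
    ∀ j : Int, 0 ≤ j → j ≤ (xs.length : Int) →
      PySem.List.pyGetD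
        ((PySem.List.pyRange 0 ((xs.length : Int) + 1) 1).foldl
          (doh2PreStep (xs.foldl (doh2AltStep (xs.length : Int))
            (List.replicate ((xs.length : Int).toNat + 1) 0, 0)).1)
          (List.replicate ((xs.length : Int).toNat + 1) 0,
           (xs.foldl (doh2AltStep (xs.length : Int))
            (List.replicate ((xs.length : Int).toNat + 1) 0, 0)).2)).1 j 0
        = cntLE xs j := by
  intro j hj1 hj2
  set n : Int := (xs.length : Int) with hn
  have hn0 : 0 ≤ n := by positivity
  obtain ⟨f1, f2, f3, f4⟩ := freq_inv n hn0 xs (List.replicate (n.toNat + 1) 0) 0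
      (by simp)
  set fb := xs.foldl (doh2AltStep n) (List.replicate (n.toNat + 1) 0, 0) with hfb
  obtain ⟨p1, p2, p3⟩ := pre_inv fb.1 (n.toNat + 1) (n.toNat + 1)
      (List.replicate (n.toNat + 1) 0) fb.2 (by simp) (le_refl _)
  rw [show (n : Int) + 1 = ((n.toNat + 1 : Nat) : Int) by omega]
  rw [p3 j hj1 (by omega)]
  -- now: fb.2 + freqSum fb.1 (j.toNat+1) = cntLE xs j, by induction on j.toNat
  have base : fb.2 = (xs.countP (fun x => x ≤ 0) : Int) := by rw [f2]; ring
  have freq0 : PySem.List.pyGetD fb.1 0 0 = 0 := by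
    rw [f3, getD_replicate]; omega
  have freqv : ∀ v : Int, 1 ≤ v → v ≤ n →
      PySem.List.pyGetD fb.1 v 0 = (xs.countP (fun x => x = v) : Int) := by
    intro v hv1 hv2
    rw [f4 v hv1 hv2, getD_replicate _ v (by omega)]; ring
  have key : ∀ m : Nat, (m : Int) ≤ n →
      fb.2 + freqSum fb.1 (m + 1) = cntLE xs (m : Int) := by
    intro m
    induction m with
    | zero =>
      intro _
      simp [freqSum, freq0, base, cntLE]
    | succ m ihm =>
      intro hm
      have : freqSum fb.1 (m + 1 + 1)
          = freqSum fb.1 (m + 1) + PySem.List.pyGetD fb.1 ((m : Int) + 1) 0 := by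
        simp [freqSum, List.range_succ]
        ring
      rw [this, freqv ((m : Int) + 1) (by omega) (by push_cast at hm ⊢; omega)]
      rw [show ((m + 1 : Nat) : Int) = (m : Int) + 1 by push_cast; ring, cntLE_succ]
      rw [← ihm (by push_cast at hm ⊢; omega)]
      ring
  have := key j.toNat (by omega)
  rw [show ((j.toNat : Nat) : Int) = j by omega] at this
  rw [show j.toNat + 1 = j.toNat + 1 from rfl]
  exact this

-- the two while-loops agree whenever pre holds the counts
theorem loops_agree (xs : List Int) (pre : List Int)
    (hpre : ∀ j : Int, 0 ≤ j → j ≤ (xs.length : Int) →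
        PySem.List.pyGetD pre j 0 = cntLE xs j) :
    ∀ (m : Nat) (b e : Int), (e - b).toNat = m → 0 ≤ b → e ≤ (xs.length : Int) →
      doh2Loop xs b e = doh2AltLoop pre b e := by
  intro m
  induction m using Nat.strong_induction_on with
  | _ m ih =>
    intro b e hm hb he
    by_cases h : b + 1 < e
    · rw [doh2Loop, doh2AltLoop]
      simp only [dif_pos h]
      have hmid := doh2_mid_bounds h
      set i := PySem.Int.floordiv (b + e) 2 with hi
      have hcnt : (xs.map (fun x => if b < x ∧ x ≤ i then (1 : Int) else 0)).sum
          = PySem.List.pyGetD pre i 0 - PySem.List.pyGetD pre b 0 := by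
        rw [sum_band xs b i (by omega), hpre i (by omega) (by omega),
            hpre b hb (by omega)]
      rw [hcnt]
      by_cases hc : PySem.List.pyGetD pre i 0 - PySem.List.pyGetD pre b 0 > i - b
      · rw [if_pos hc, if_pos hc]
        exact ih (i - b).toNat (by omega) b i rfl hb (by omega)
      · rw [if_neg hc, if_neg hc]
        exact ih (e - i).toNat (by omega) i e rfl (by omega) he
    · rw [doh2Loop, doh2AltLoop, dif_neg h, dif_neg h]

-- ===== VERDICT (by name: the statement is the Claim_ definition above) =====
theorem doh2_spec : Claim_equal_doh2 := by
  intro xs _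
  unfold Spec_doh2 doh2 doh2_alt
  exact loops_agree xs _ (pre_is_cntLE xs) (((xs.length : Int)) - 0).toNat 0
    ((xs.length : Int)) rfl (le_refl 0) (le_refl _)
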